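-- pv_equiv track=rewrite | github.com/shameekyogi68/scriptpulse-antigravity | scriptpulse/agents/encoding.py | extract_visual_abstraction
-- ===== SOURCE A (Python) =====
-- def extract_visual_abstraction(scene_lines):
--     """
--     Extract visual abstraction features (observable action density).
--
--     Features:
--     - action_lines: count of action/description lines
--     - continuous_action_runs: sequences of consecutive action lines
--     - vertical_writing_load: total action lines (writing density)
--     """
--     action_lines = [line for line in scene_lines if line['tag'] == 'A']
--     action_count = len(action_lines)
--
--     # Count continuous runs of action
--     continuous_runs = 0
--     if action_count > 0:
--         in_run = False
--         for line in scene_lines: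
--             if line['tag'] == 'A':
--                 if not in_run:
--                     continuous_runs += 1
--                     in_run = True
--             else:
--                 in_run = False
--
--     return {
--         'action_lines': action_count,
--         'continuous_action_runs': continuous_runs,
--         'vertical_writing_load': action_count  # Total action for density
--     }
-- ===== SOURCE B (Python) =====
-- def extract_visual_abstraction(scene_lines):
--     mask = ''.join('A' if line['tag'] == 'A' else ' ' for line in scene_lines)
--     action_count = mask.count('A')
--     continuous_runs = len(mask.split())
--     return {
--         'action_lines': action_count,
--         'continuous_action_runs': continuous_runs,
--         'vertical_writing_load': action_count
--     }
-- ===== Notes on version B (the rewrite author's own statement) =====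
-- stated objective: alternative
-- what changed: B re-encodes the scene as a character mask string ('A' for action lines, space otherwise) and reads both features off the string: action count via str.count('A') and continuous runs via len(mask.split()), replacing A's filter pass plus in_run boolean state machine.
import Mathlib
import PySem

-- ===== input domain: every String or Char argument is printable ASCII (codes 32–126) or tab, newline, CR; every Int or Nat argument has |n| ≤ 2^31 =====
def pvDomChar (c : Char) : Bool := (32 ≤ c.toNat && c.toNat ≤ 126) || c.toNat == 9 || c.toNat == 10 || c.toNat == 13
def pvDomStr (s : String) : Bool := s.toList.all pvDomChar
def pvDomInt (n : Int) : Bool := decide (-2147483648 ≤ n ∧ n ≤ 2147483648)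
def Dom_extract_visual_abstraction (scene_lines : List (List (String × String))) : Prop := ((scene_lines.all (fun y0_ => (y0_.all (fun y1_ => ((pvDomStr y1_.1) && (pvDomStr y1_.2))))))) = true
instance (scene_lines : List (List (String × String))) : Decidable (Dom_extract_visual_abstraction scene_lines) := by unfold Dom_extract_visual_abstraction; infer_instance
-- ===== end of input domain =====

-- B re-encodes the scene as a character mask string and reads both features off the string
-- (str.count for the action count, whitespace split for the run count), replacing A's
-- filter pass + in_run state machine; same O(n) cost, different representation.
-- Both Pythons raise KeyError when some line lacks the 'tag' key; Pre_ excludes exactly those inputs.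

-- line['tag'] as first match in the association list (Pre_ guarantees the key is present)
def pvTag (line : List (String × String)) : String :=
  ((line.find? (fun p => p.1 == "tag")).map (·.2)).getD ""

-- ===== PORT A =====
-- the loop body of A's run-counting state machine (state = (in_run, continuous_runs))
def pvStepA (s : Bool × Int) (line : List (String × String)) : Bool × Int :=
  if pvTag line == "A" then
    (if !s.1 then (true, s.2 + 1) else s)
  else (false, s.2)

def extract_visual_abstraction (scene_lines : List (List (String × String))) : List (String × Int) :=
  let action_lines := scene_lines.filter (fun line => pvTag line == "A")
  let action_count : Int := action_lines.length
  let continuous_runs : Int :=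
    if action_count > 0 then (scene_lines.foldl pvStepA (false, 0)).2 else 0
  [("action_lines", action_count),
   ("continuous_action_runs", continuous_runs),
   ("vertical_writing_load", action_count)]

-- ===== PORT B =====
def extract_visual_abstraction_alt (scene_lines : List (List (String × String))) : List (String × Int) :=
  let mask : String :=
    PySem.Str.join "" (scene_lines.map (fun line => if pvTag line == "A" then "A" else " "))
  let action_count : Int := (PySem.Str.count mask "A" : Int)
  let continuous_runs : Int := ((PySem.Str.split₀ mask).length : Int)
  [("action_lines", action_count),
   ("continuous_action_runs", continuous_runs),
   ("vertical_writing_load", action_count)]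

-- ===== PRECONDITION & SPEC =====
-- Pre_ excludes exactly the inputs where line['tag'] raises KeyError in A (and in B alike)
def Pre_extract_visual_abstraction (scene_lines : List (List (String × String))) : Prop :=
  (scene_lines.all (fun line => line.any (fun p => p.1 == "tag"))) = true
instance (scene_lines : List (List (String × String))) : Decidable (Pre_extract_visual_abstraction scene_lines) := by unfold Pre_extract_visual_abstraction; infer_instance
def pvWitness_extract_visual_abstraction : (List (List (String × String))) := [[("tag", "A")], [("tag", "D")], [("tag", "A")], [("tag", "A")]]

def Spec_extract_visual_abstraction (scene_lines : List (List (String × String))) (out : List (String × Int)) : Prop := out = extract_visual_abstraction_alt scene_lines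
instance (scene_lines : List (List (String × String))) (out : List (String × Int)) : Decidable (Spec_extract_visual_abstraction scene_lines out) := by unfold Spec_extract_visual_abstraction; infer_instance

-- ===== CLAIM (what is proved, stated in full; the proofs are below) =====
def Claim_equal_extract_visual_abstraction : Prop := ∀ (scene_lines : List (List (String × String))), Dom_extract_visual_abstraction scene_lines → Pre_extract_visual_abstraction scene_lines → Spec_extract_visual_abstraction scene_lines (extract_visual_abstraction scene_lines)

-- ===== LEMMAS AND PROOFS =====

-- the boolean tag sequence and its character mask
def pvTags (scene_lines : List (List (String × String))) : List Bool :=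
  scene_lines.map (fun line => pvTag line == "A")

def pvMaskChars (bs : List Bool) : List Char :=
  bs.map (fun b => if b then 'A' else ' ')

-- abstract run counter: number of False→True rises given the previous tag
def pvRunCount : List Bool → Bool → Nat
  | [], _ => 0
  | b :: bs, inRun => (if b && !inRun then 1 else 0) + pvRunCount bs b

-- the mask string's char list is exactly pvMaskChars of the tag list
lemma mask_toList (scene_lines : List (List (String × String))) :
    (PySem.Str.join "" (scene_lines.map (fun line => if pvTag line == "A" then "A" else " "))).toList
      = pvMaskChars (pvTags scene_lines) := by
  have h : (scene_lines.map (fun line => if pvTag line == "A" then "A" else " ")).map String.toList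
      = (pvMaskChars (pvTags scene_lines)).map (fun c => [c]) := by
    simp only [pvMaskChars, pvTags, List.map_map]
    refine List.map_congr_left (fun l _ => ?_)
    by_cases h : pvTag l = "A" <;> simp [h]
  rw [PySem.Str.join]
  simp only [String.toList_ofList]
  rw [show ("" : String).toList = [] from rfl, h]
  exact PySem.Chars.join_nil_singletons _

-- A's fold equals the abstract run counter
lemma foldA_eq_runCount (scene_lines : List (List (String × String))) :
    ∀ (prev : Bool) (acc : Int),
      (scene_lines.foldl pvStepA (prev, acc)).2 = acc + (pvRunCount (pvTags scene_lines) prev : Int) := by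
  induction scene_lines with
  | nil => intro prev acc; simp [pvTags, pvRunCount]
  | cons l ls ih =>
    intro prev acc
    simp only [List.foldl_cons, pvTags, List.map_cons, pvRunCount, pvStepA]
    by_cases h : (pvTag l == "A") = true
    · cases prev <;> (simp [h, ih, pvTags]; try ring)
    · simp only [Bool.not_eq_true] at h
      simp [h, ih, pvTags]

-- if no tag is 'A', the run counter is 0
lemma runCount_all_false (bs : List Bool) (h : ∀ b ∈ bs, b = false) :
    ∀ prev, pvRunCount bs prev = 0 := by
  induction bs with
  | nil => intro prev; simp [pvRunCount]
  | cons b bs ih =>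
    intro prev
    have hb : b = false := h b (by simp)
    simp [pvRunCount, hb, ih (fun x hx => h x (by simp [hx]))]

-- the whitespace-split worker counts runs: invariant over split₀.go
lemma split_go_length (bs : List Bool) :
    ∀ (cur : List Char) (acc : List (List Char)),
      (PySem.Chars.split₀.go (pvMaskChars bs) cur acc).length
        = acc.length + (if cur.isEmpty then 0 else 1) + pvRunCount bs (!cur.isEmpty) := by
  induction bs with
  | nil =>
    intro cur acc
    cases cur <;> simp [pvMaskChars, PySem.Chars.split₀.go, pvRunCount]
  | cons b bs ih =>
    intro cur acc
    have hsp : PySem.Chars.isspace ' ' = true := by decide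
    have hnsp : PySem.Chars.isspace 'A' = false := by decide
    rw [show pvMaskChars (b :: bs) = (if b then 'A' else ' ') :: pvMaskChars bs from rfl]
    cases b <;> cases cur <;>
      (simp [PySem.Chars.split₀.go, hsp, hnsp, pvRunCount, ih]; try omega)

-- the substring-count worker on the single char 'A' is List.count
lemma count_go_eq (l : List Char) :
    ∀ (fuel acc : Nat), l.length ≤ fuel →
      PySem.Chars.count.go ['A'] fuel l acc = acc + l.count 'A' := by
  induction l with
  | nil => intro fuel acc _; cases fuel <;> simp [PySem.Chars.count.go]
  | cons c cs ih =>
    intro fuel acc hf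
    cases fuel with
    | zero => simp at hf
    | succ f =>
      have hf' : cs.length ≤ f := by simpa using hf
      by_cases h : c = 'A'
      · have hp : (['A'].isPrefixOf (c :: cs)) = true := by simp [List.isPrefixOf, h]
        simp [PySem.Chars.count.go, ih f (acc + 1) hf', h]
        omega
      · have hp : (['A'].isPrefixOf (c :: cs)) = false := by
          simp [List.isPrefixOf]; exact fun hh => h hh.symm
        simp [PySem.Chars.count.go, hp, ih f acc hf', h]

-- counting 'A' in the mask = counting true in the tag list
lemma mask_count (bs : List Bool) : (pvMaskChars bs).count 'A' = bs.count true := by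
  induction bs with
  | nil => simp [pvMaskChars]
  | cons b bs ih =>
    rw [show pvMaskChars (b :: bs) = (if b then 'A' else ' ') :: pvMaskChars bs from rfl]
    cases b <;> simp [ih]

-- A's filter length = count of true tags
lemma filter_len_eq (scene_lines : List (List (String × String))) :
    (scene_lines.filter (fun line => pvTag line == "A")).length = (pvTags scene_lines).count true := by
  induction scene_lines with
  | nil => simp [pvTags]
  | cons l ls ih =>
    by_cases h : (pvTag l == "A") = true <;>
      simp [pvTags, h] at ih ⊢ <;> simp [ih]

-- ===== VERDICT (by name: the statement is the Claim_ definition above) =====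
theorem extract_visual_abstraction_spec : Claim_equal_extract_visual_abstraction := by
  intro scene_lines _ _
  unfold Spec_extract_visual_abstraction extract_visual_abstraction extract_visual_abstraction_alt
  simp only []
  have hmask := mask_toList scene_lines
  -- B's action count
  have hcount : PySem.Str.count
      (PySem.Str.join "" (scene_lines.map (fun line => if pvTag line == "A" then "A" else " "))) "A"
      = (scene_lines.filter (fun line => pvTag line == "A")).length := by
    rw [PySem.Str.count, hmask, show ("A" : String).toList = ['A'] from rfl,
        PySem.Chars.count, if_neg (by decide)]
    rw [count_go_eq _ _ 0 (le_refl _), mask_count, filter_len_eq]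
    simp
  -- B's run count
  have hruns : (PySem.Str.split₀
      (PySem.Str.join "" (scene_lines.map (fun line => if pvTag line == "A" then "A" else " ")))).length
      = pvRunCount (pvTags scene_lines) false := by
    simp only [PySem.Str.split₀, List.length_map, PySem.Chars.split₀, hmask]
    simpa using split_go_length (pvTags scene_lines) [] []
  refine congrArg₂ _ (by rw [hcount]) (congrArg₂ _ ?_ (by rw [hcount]))
  refine congrArg (fun r => ("continuous_action_runs", r)) ?_
  rw [hruns]
  by_cases hpos : ((scene_lines.filter (fun line => pvTag line == "A")).length : Int) > 0
  · rw [if_pos hpos, foldA_eq_runCount]; ring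
  · rw [if_neg hpos]
    have hlen : (pvTags scene_lines).count true = 0 := by
      rw [← filter_len_eq]; omega
    have : ∀ b ∈ pvTags scene_lines, b = false := by
      intro b hb
      cases b
      · rfl
      · exact absurd (List.count_pos_iff.mpr hb) (by omega)
    rw [runCount_all_false _ this]; simp
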